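-- pv_equiv track=rewrite | github.com/Kulak-Informatica/BeginselenVanProgrammeren | les7/Opdracht4.py | genereerZinnen
-- ===== SOURCE A (Python) =====
-- def genereerZinnen(woordenLijst):
--     if len(woordenLijst) == 1:
--         return [woordenLijst[0]]
--
--     resultaten = []
--
--     for woord in woordenLijst:
--         restWoordenLijst = list(woordenLijst)
--         restWoordenLijst.remove(woord)
--
--         restZinnen = genereerZinnen(restWoordenLijst)
--
--         for zin in restZinnen:
--             resultaten.append(woord + " " + zin)
--
--     return resultaten
-- ===== SOURCE B (Python) =====
-- def genereerZinnen(woordenLijst):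
--     # Iterative breadth-first expansion of (sentence-so-far, remaining words)
--     # states instead of A's recursion; each chosen word is removed at its first
--     # occurrence, as A's list.remove does.
--     if not woordenLijst:
--         return []
--     toestanden = [([], list(woordenLijst))]
--     for _ in range(len(woordenLijst)):
--         toestanden = [(zin + [w], rest[:rest.index(w)] + rest[rest.index(w) + 1:])
--                       for zin, rest in toestanden
--                       for w in rest]
--     return [" ".join(zin) for zin, _ in toestanden]
-- ===== Notes on version B (the rewrite author's own statement) =====
-- stated objective: alternative
-- what changed: Replaced A's top-down recursion (copy the list, remove the word, recurse per word) by an iterative breadth-first frontier of (sentence-so-far, remaining-words) states expanded len(woordenLijst) times, with the sentences joined once at the end.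
import Mathlib
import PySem

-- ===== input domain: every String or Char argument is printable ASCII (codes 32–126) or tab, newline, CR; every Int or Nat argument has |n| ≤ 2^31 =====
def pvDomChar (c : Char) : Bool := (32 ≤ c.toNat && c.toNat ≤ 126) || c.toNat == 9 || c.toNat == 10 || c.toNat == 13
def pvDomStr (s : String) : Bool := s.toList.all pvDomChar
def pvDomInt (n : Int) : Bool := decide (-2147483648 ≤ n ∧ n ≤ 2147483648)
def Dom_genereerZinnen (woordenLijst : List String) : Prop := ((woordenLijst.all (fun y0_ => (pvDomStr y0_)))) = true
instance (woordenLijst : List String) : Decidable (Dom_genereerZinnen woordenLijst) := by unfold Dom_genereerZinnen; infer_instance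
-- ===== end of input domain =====

-- B replaces A's recursion by an iterative breadth-first frontier of
-- (sentence, remaining-words) states; same results in the same order
-- (objective: alternative).

-- ===== PORT A =====
def genereerZinnen (woordenLijst : List String) : List String :=
  if woordenLijst.length = 1 then
    [PySem.List.pyGetD woordenLijst 0 ""]  -- woordenLijst[0]; index 0 is in range since len = 1
  else
    woordenLijst.attach.foldl
      (fun resultaten w =>
        -- restWoordenLijst = a copy with the first occurrence of w removed:
        -- Python list.remove on a member is List.erase (PySem.List.remove?_eq_some_erase)
        let restWoordenLijst := woordenLijst.erase w.1
        resultaten ++ (genereerZinnen restWoordenLijst).map (fun zin => w.1 ++ " " ++ zin))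
      []
termination_by woordenLijst.length
decreasing_by
  have h1 := List.length_erase_of_mem w.2
  have h2 := List.length_pos_of_mem w.2
  omega

-- ===== PORT B =====
def genereerZinnen_alt (woordenLijst : List String) : List String :=
  if woordenLijst = [] then []
  else
    let eind := (List.range woordenLijst.length).foldl
      (fun toestanden _ =>
        toestanden.flatMap (fun zr =>
          zr.2.map (fun w =>
            -- rest.index(w) always succeeds here: w is drawn from rest
            (zr.1 ++ [w],
             PySem.List.slice zr.2 none
               (some (((PySem.List.index? zr.2 w).getD 0 : Nat) : Int)) ++
               PySem.List.slice zr.2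
                 (some ((((PySem.List.index? zr.2 w).getD 0 : Nat) : Int) + 1)) none))))
      [(([] : List String), woordenLijst)]
    eind.map (fun zr => PySem.Str.join " " zr.1)

-- ===== PRECONDITION & SPEC =====
def Spec_genereerZinnen (woordenLijst : List String) (out : List String) : Prop := out = genereerZinnen_alt woordenLijst
instance (woordenLijst : List String) (out : List String) : Decidable (Spec_genereerZinnen woordenLijst out) := by unfold Spec_genereerZinnen; infer_instance

-- ===== CLAIM (what is proved, stated in full; the proofs are below) =====
def Claim_equal_genereerZinnen : Prop := ∀ (woordenLijst : List String), Dom_genereerZinnen woordenLijst → Spec_genereerZinnen woordenLijst (genereerZinnen woordenLijst)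

-- ===== LEMMAS AND PROOFS =====

-- B's one expansion step of the frontier (the body of the foldl in the port).
def pvStep (st : List (List String × List String)) : List (List String × List String) :=
  st.flatMap (fun zr =>
    zr.2.map (fun w =>
      (zr.1 ++ [w],
       PySem.List.slice zr.2 none
         (some (((PySem.List.index? zr.2 w).getD 0 : Nat) : Int)) ++
         PySem.List.slice zr.2
           (some ((((PySem.List.index? zr.2 w).getD 0 : Nat) : Int) + 1)) none)))

-- k-fold iteration of pvStep, as the foldl over range performs it.
def pvIter (k : Nat) (st : List (List String × List String)) : List (List String × List String) :=
  (List.range k).foldl (fun t _ => pvStep t) st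

-- the sentences A generates, as word lists: pick each remaining word in turn,
-- removing its first occurrence
def pvPerms (xs : List String) : List (List String) :=
  if xs = [] then [[]]
  else xs.attach.flatMap (fun w => (pvPerms (xs.erase w.1)).map (w.1 :: ·))
termination_by xs.length
decreasing_by
  have h1 := List.length_erase_of_mem w.2
  have h2 := List.length_pos_of_mem w.2
  omega

lemma pvIter_succ (k : Nat) (st : List (List String × List String)) :
    pvIter (k + 1) st = pvStep (pvIter k st) := by
  simp [pvIter, List.range_succ, List.foldl_append]

lemma pvIter_succ' (k : Nat) (st : List (List String × List String)) :
    pvIter (k + 1) st = pvIter k (pvStep st) := by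
  induction k generalizing st with
  | zero => rfl
  | succ k ih => rw [pvIter_succ, ih, ← pvIter_succ]

lemma pvStep_append (a b : List (List String × List String)) :
    pvStep (a ++ b) = pvStep a ++ pvStep b := by
  simp [pvStep]

lemma pvIter_append (k : Nat) (a b : List (List String × List String)) :
    pvIter k (a ++ b) = pvIter k a ++ pvIter k b := by
  induction k with
  | zero => rfl
  | succ k ih => simp [pvIter_succ, ih, pvStep_append]

lemma pvIter_flatMap (k : Nat) (st : List (List String × List String)) :
    pvIter k st = st.flatMap (fun s => pvIter k [s]) := by
  induction st with
  | nil =>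
      have : pvIter k [] = [] := by
        induction k with
        | zero => rfl
        | succ k ih => rw [pvIter_succ, ih]; rfl
      simp [this]
  | cons s t ih =>
      have : s :: t = [s] ++ t := rfl
      rw [this, pvIter_append, ih]
      simp

-- removing the element at rest.index(w) is removing the first occurrence of w
lemma pvEraseBridge (rest : List String) (w : String) (hw : w ∈ rest) :
    PySem.List.slice rest none
        (some (((PySem.List.index? rest w).getD 0 : Nat) : Int)) ++
      PySem.List.slice rest
        (some ((((PySem.List.index? rest w).getD 0 : Nat) : Int) + 1)) none
      = rest.erase w := by
  obtain ⟨k, hk⟩ : ∃ k, PySem.List.index? rest w = some k :=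
    Option.isSome_iff_exists.mp ((PySem.List.index?_isSome_iff rest w).mpr hw)
  obtain ⟨pre, suf, hsplit, hlen, hnot⟩ := (PySem.List.index?_eq_some_iff rest w k).mp hk
  have h1 : (((k : Nat) : Int) + 1) = ((k + 1 : Nat) : Int) := by push_cast; ring
  rw [hk, Option.getD_some, h1, PySem.List.slice_to_natCast, PySem.List.slice_from_natCast,
    hsplit, ← hlen]
  rw [List.take_left, List.erase_append_right _ hnot, List.drop_append]
  simp

lemma pvStep_singleton (pre rest : List String) :
    pvStep [(pre, rest)] = rest.map (fun w => (pre ++ [w], rest.erase w)) := by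
  unfold pvStep
  rw [List.flatMap_singleton]
  apply List.map_congr_left
  intro w hw
  rw [pvEraseBridge rest w hw]

lemma pvAttach_flatMap {β : Type} (xs : List String) (g : String → List β) :
    xs.attach.flatMap (fun w => g w.1) = xs.flatMap g := by
  conv_rhs => rw [← List.attach_map_subtype_val xs, List.flatMap_map]

-- the frontier after |xs| steps from a single state is exactly A's enumeration
lemma pvIter_perms (n : Nat) (xs pre : List String) (hl : xs.length = n) :
    pvIter n [(pre, xs)] = (pvPerms xs).map (fun p => (pre ++ p, ([] : List String))) := by
  induction n generalizing xs pre with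
  | zero =>
      have hx : xs = [] := List.length_eq_zero_iff.mp hl
      subst hx
      rw [pvPerms]
      simp [pvIter]
  | succ n ih =>
      have hne : xs ≠ [] := by intro hc; rw [hc] at hl; simp at hl
      rw [pvIter_succ', pvStep_singleton, pvIter_flatMap, List.flatMap_map]
      conv_rhs =>
        rw [pvPerms, if_neg hne,
          pvAttach_flatMap xs (fun w => (pvPerms (xs.erase w)).map (w :: ·)),
          List.map_flatMap]
      apply List.flatMap_congr
      intro w hw
      have hlen : (xs.erase w).length = n := by
        have := List.length_erase_of_mem hw
        omega
      rw [ih (xs.erase w) (pre ++ [w]) hlen, List.map_map]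
      apply List.map_congr_left
      intro p hp
      simp

lemma pvPerms_length (n : Nat) (xs : List String) (hl : xs.length = n)
    (p : List String) (hp : p ∈ pvPerms xs) : p.length = xs.length := by
  induction n generalizing xs p with
  | zero =>
      have hx : xs = [] := List.length_eq_zero_iff.mp hl
      subst hx
      rw [pvPerms] at hp
      simp at hp
      simp [hp]
  | succ n ih =>
      have hne : xs ≠ [] := by intro hc; rw [hc] at hl; simp at hl
      rw [pvPerms, if_neg hne] at hp
      obtain ⟨w, hw, hpw⟩ := List.mem_flatMap.mp hp
      obtain ⟨q, hq, rfl⟩ := List.mem_map.mp hpw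
      have hlen : (xs.erase w.1).length = n := by
        have := List.length_erase_of_mem w.2
        omega
      have := ih (xs.erase w.1) hlen q hq
      simp only [List.length_cons, this, hlen, hl]

lemma pvJoin_singleton (w : String) : PySem.Str.join " " [w] = w := by
  apply String.toList_inj.mp
  simp [PySem.Str.toList_join, PySem.Chars.join_singleton]

lemma pvJoin_cons (w : String) (p : List String) (hp : p ≠ []) :
    PySem.Str.join " " (w :: p) = w ++ " " ++ PySem.Str.join " " p := by
  obtain ⟨q, rest, rfl⟩ := List.exists_cons_of_ne_nil hp
  apply String.toList_inj.mp
  simp [PySem.Str.toList_join, PySem.Chars.join_cons_cons]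

-- A computes exactly pvPerms, joined with spaces
lemma pvA_perms (n : Nat) (xs : List String) (hl : xs.length = n) (hne : xs ≠ []) :
    genereerZinnen xs = (pvPerms xs).map (PySem.Str.join " ") := by
  induction n using Nat.strong_induction_on generalizing xs with
  | _ n ih =>
  by_cases h1 : xs.length = 1
  · obtain ⟨w, t, rfl⟩ := List.exists_cons_of_ne_nil hne
    have ht : t = [] := by
      simp only [List.length_cons] at h1; exact List.length_eq_zero_iff.mp (by omega)
    subst ht
    have h0 : pvPerms ([] : List String) = [[]] := by rw [pvPerms]; rfl
    have hw : pvPerms [w] = [[w]] := by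
      rw [pvPerms]
      simp [h0, List.attach]
    rw [hw, List.map_singleton, pvJoin_singleton, genereerZinnen]
    rfl
  · rw [genereerZinnen]
    simp only [if_neg h1]
    rw [PySem.List.foldl_append_eq_flatMap, List.nil_append,
      pvAttach_flatMap xs
        (fun w => (genereerZinnen (xs.erase w)).map (fun zin => w ++ " " ++ zin))]
    conv_rhs =>
      rw [pvPerms, if_neg hne,
        pvAttach_flatMap xs (fun w => (pvPerms (xs.erase w)).map (w :: ·)),
        List.map_flatMap]
    apply List.flatMap_congr
    intro w hw
    have hlen0 : 0 < xs.length := List.length_pos_of_ne_nil hne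
    have hlene : (xs.erase w).length = xs.length - 1 := List.length_erase_of_mem hw
    have hne' : xs.erase w ≠ [] := by
      intro hc
      rw [hc] at hlene
      simp at hlene
      omega
    have hA := ih (xs.length - 1) (by omega) (xs.erase w) (by omega) hne'
    rw [hA, List.map_map, List.map_map]
    apply List.map_congr_left
    intro p hp
    have hplen : p.length = (xs.erase w).length :=
      pvPerms_length (xs.erase w).length (xs.erase w) rfl p hp
    have hpne : p ≠ [] := by
      intro hc
      rw [hc] at hplen
      simp at hplen
      omega
    simp only [Function.comp]
    rw [pvJoin_cons w p hpne]

-- ===== VERDICT (by name: the statement is the Claim_ definition above) =====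
theorem genereerZinnen_spec : Claim_equal_genereerZinnen := by
  intro ws _
  unfold Spec_genereerZinnen
  by_cases hne : ws = []
  · subst hne; rw [genereerZinnen]; rfl
  · rw [pvA_perms ws.length ws rfl hne]
    have hB : genereerZinnen_alt ws
        = (pvIter ws.length [([], ws)]).map (fun zr => PySem.Str.join " " zr.1) := by
      simp [genereerZinnen_alt, hne, pvIter, pvStep]
    rw [hB, pvIter_perms ws.length ws [] rfl]
    simp [Function.comp]
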